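-- pv_equiv track=rewrite | github.com/HannahLever/base-conversion | base_converter_2-10_i.py | to_dec
-- ===== SOURCE A (Python) =====
-- def to_dec(base, num):
--     # store -/+ to treat num as positive through calculations
--     sign = int(num / abs(num))
--     num = abs(num)
--
--     # multiply each digit by place value, sum with previous digit values
--     result = 0
--     mult = 1
--     while num > 0:
--         result += (num % 10) * mult
--         num = num // 10
--         mult = mult * base
--
--     # restore -/+
--     result = sign * result
--     return result
-- ===== SOURCE B (Python) =====
-- def to_dec(base, num):
--     # MSB-first Horner by recursion: no place-value accumulator.
--     # Returns 0 for num == 0 (where A raises ZeroDivisionError).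
--     def horner(n):
--         if n <= 0:
--             return 0
--         return horner(n // 10) * base + n % 10
--
--     sign = -1 if num < 0 else 1
--     return sign * horner(abs(num))
-- ===== Notes on version B (the rewrite author's own statement) =====
-- stated objective: simpler
-- what changed: Replaces the iterative LSB-first place-value loop (result/mult accumulators) with a recursive MSB-first Horner evaluation and a branch-based sign, returning 0 for num == 0 where A raises.
-- crash fix: On num == 0 A raises ZeroDivisionError from int(num / abs(num)); B returns 0, the correct conversion of zero. — e.g. on to_dec(2, 0): A raises ZeroDivisionError, B returns 0
import Mathlib
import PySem

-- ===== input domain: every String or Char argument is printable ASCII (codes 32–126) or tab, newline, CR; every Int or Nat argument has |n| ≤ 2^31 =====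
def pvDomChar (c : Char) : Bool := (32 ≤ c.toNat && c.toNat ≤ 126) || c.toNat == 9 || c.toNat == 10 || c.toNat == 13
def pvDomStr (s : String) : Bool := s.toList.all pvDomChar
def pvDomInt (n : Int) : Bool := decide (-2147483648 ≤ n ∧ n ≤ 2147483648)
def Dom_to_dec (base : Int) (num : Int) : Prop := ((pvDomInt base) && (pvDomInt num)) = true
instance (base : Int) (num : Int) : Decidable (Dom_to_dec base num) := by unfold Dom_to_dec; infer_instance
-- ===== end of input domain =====

-- B replaces A's iterative LSB-first place-value loop by a recursive MSB-first Horner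
-- evaluation (objective: simpler); equivalence on num ≠ 0, plus a crash-fix claim at num = 0.

-- termination helper for both ports' recursion on n // 10
theorem pv_fdiv10_lt (n : Int) (h : 0 < n) : (PySem.Int.floordiv n 10).toNat < n.toNat := by
  simp only [PySem.Int.floordiv]
  rw [Int.fdiv_eq_ediv]
  simp only [show ((0:Int) ≤ 10 ∨ (10:Int) ∣ n) = True from by simp, if_true]
  omega

-- ===== PORT A =====
-- 'sign = int(num / abs(num))': exact for num ≠ 0 (the only inputs Pre_ admits; Python raises at 0)
def to_dec_loop (base : Int) (num result mult : Int) : Int :=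
  if h : num > 0 then
    to_dec_loop base (PySem.Int.floordiv num 10) (result + (PySem.Int.mod num 10) * mult) (mult * base)
  else result
termination_by num.toNat
decreasing_by exact pv_fdiv10_lt num h

def to_dec (base : Int) (num : Int) : Int :=
  let sign : Int := if num < 0 then -1 else 1
  let num := |num|
  let result := to_dec_loop base num 0 1
  sign * result

-- ===== PORT B =====
def to_dec_horner (base : Int) (n : Int) : Int :=
  if h : n ≤ 0 then 0
  else to_dec_horner base (PySem.Int.floordiv n 10) * base + PySem.Int.mod n 10
termination_by n.toNat
decreasing_by exact pv_fdiv10_lt n (by omega)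

def to_dec_alt (base : Int) (num : Int) : Int :=
  let sign : Int := if num < 0 then -1 else 1
  sign * to_dec_horner base |num|

-- ===== PRECONDITION & SPEC =====
-- Pre_ excludes exactly num = 0, where A raises ZeroDivisionError in int(num / abs(num)).
def Pre_to_dec (base : Int) (num : Int) : Prop := num ≠ 0
instance (base : Int) (num : Int) : Decidable (Pre_to_dec base num) := by unfold Pre_to_dec; infer_instance
def pvWitness_to_dec : Int × Int := (5, -42)

-- On num = 0 A raises ZeroDivisionError; B returns 0, the correct conversion of zero.
def Raises_to_dec (base : Int) (num : Int) : Prop := num = 0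
instance (base : Int) (num : Int) : Decidable (Raises_to_dec base num) := by unfold Raises_to_dec; infer_instance
def pvRaiseWitness_to_dec : Int × Int := (2, 0)
def pvRaiseWitnessOut_to_dec : Int := 0

def Spec_to_dec (base : Int) (num : Int) (out : Int) : Prop := out = to_dec_alt base num
instance (base : Int) (num : Int) (out : Int) : Decidable (Spec_to_dec base num out) := by unfold Spec_to_dec; infer_instance

-- ===== CLAIM (what is proved, stated in full; the proofs are below) =====
def Claim_equal_to_dec : Prop := ∀ (base : Int) (num : Int), Dom_to_dec base num → Pre_to_dec base num → Spec_to_dec base num (to_dec base num)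
def Claim_raises_to_dec : Prop := (∀ (base : Int) (num : Int), Dom_to_dec base num → Raises_to_dec base num → ¬ Pre_to_dec base num) ∧ (Dom_to_dec (pvRaiseWitness_to_dec.1) (pvRaiseWitness_to_dec.2) ∧ Raises_to_dec (pvRaiseWitness_to_dec.1) (pvRaiseWitness_to_dec.2) ∧ to_dec_alt (pvRaiseWitness_to_dec.1) (pvRaiseWitness_to_dec.2) = pvRaiseWitnessOut_to_dec)

-- ===== LEMMAS AND PROOFS =====
-- Loop invariant: A's loop computes result + mult * Horner(n) (induction on a bound k of n.toNat).
theorem to_dec_loop_eq (base : Int) : ∀ (k : Nat) (n : Int), n.toNat ≤ k →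
    ∀ result mult, to_dec_loop base n result mult = result + mult * to_dec_horner base n := by
  intro k
  induction k with
  | zero =>
    intro n hn result mult
    rw [to_dec_loop, to_dec_horner, dif_neg (by omega), dif_pos (by omega)]
    ring
  | succ k ih =>
    intro n hn result mult
    rw [to_dec_loop, to_dec_horner]
    by_cases h : n > 0
    · rw [dif_pos h, dif_neg (by omega),
        ih _ (by have := pv_fdiv10_lt n h; omega)]
      ring
    · rw [dif_neg h, dif_pos (by omega)]
      ring

-- ===== VERDICT (by name: the statement is the Claim_ definition above) =====
theorem to_dec_spec : Claim_equal_to_dec := by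
  intro base num _ _
  simp only [Spec_to_dec, to_dec, to_dec_alt]
  rw [to_dec_loop_eq base (|num|).toNat |num| le_rfl]
  ring

theorem to_dec_raises : Claim_raises_to_dec := by
  unfold Claim_raises_to_dec
  refine ⟨fun base num _ h => by simp only [Raises_to_dec] at h; simp [Pre_to_dec, h], by decide, by decide, ?_⟩
  simp only [pvRaiseWitness_to_dec, pvRaiseWitnessOut_to_dec, to_dec_alt]
  rw [to_dec_horner]
  norm_num

-- witness self-check: the raise witness does lie inside Raises_to_dec
theorem to_dec_raises_witness_ok : Raises_to_dec pvRaiseWitness_to_dec.1 pvRaiseWitness_to_dec.2 :=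
  to_dec_raises.2.2.1
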